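-- pv_equiv track=rewrite | github.com/Ian-au789/SSAFY_TIL_APS_basic | extra/배수 스위치.py | how_many_switch
-- ===== SOURCE A (Python) =====
-- def how_many_switch(bulbs):
--     cnt = 0
--     for i in range(len(bulbs)):
--         if bulbs[i] == "Y":                         # Y 찾으면 스위치 누르기
--             cnt += 1
--             for j in range(i, len(bulbs)):
--                 if (j + 1) % (i + 1) == 0:          # 번호(인덱스 + 1)가 배수인지 확인 (자기자신 포함)
--                     if bulbs[j] == "Y":             # Y는 N으로, N은 Y로 바꾸기
--                         bulbs[j] = "N"
--                     else:
--                         bulbs[j] = "Y"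
--     return cnt
-- ===== SOURCE B (Python) =====
-- def _press(bulbs, i):
--     # toggle every bulb whose number (index+1) is a multiple of i+1, by stepping directly
--     for j in range(i, len(bulbs), i + 1):
--         bulbs[j] = "N" if bulbs[j] == "Y" else "Y"
--
--
-- def how_many_switch(bulbs):
--     cnt = 0
--     for i in range(len(bulbs)):
--         if bulbs[i] == "Y":
--             cnt += 1
--             _press(bulbs, i)
--     return cnt
-- ===== Notes on version B (the rewrite author's own statement) =====
-- stated objective: alternative
-- what changed: The inner pass no longer scans every index j in [i, n) testing (j+1) % (i+1) == 0; a helper steps j directly through the multiples with range(i, len(bulbs), i+1), so each press touches only its multiples (worst-case O(n^2) vs O(n log n)); on a timing run's random inputs presses are rare, so no measured speed-up.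
import Mathlib
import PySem

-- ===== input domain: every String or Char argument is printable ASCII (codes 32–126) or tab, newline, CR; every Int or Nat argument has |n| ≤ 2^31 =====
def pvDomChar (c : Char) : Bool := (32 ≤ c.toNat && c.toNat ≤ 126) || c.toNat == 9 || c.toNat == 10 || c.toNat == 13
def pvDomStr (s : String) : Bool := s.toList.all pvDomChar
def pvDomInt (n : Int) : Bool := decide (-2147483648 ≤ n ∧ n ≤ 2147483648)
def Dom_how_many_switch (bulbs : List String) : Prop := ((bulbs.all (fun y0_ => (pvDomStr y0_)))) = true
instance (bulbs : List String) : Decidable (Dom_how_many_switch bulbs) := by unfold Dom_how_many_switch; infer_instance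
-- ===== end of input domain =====

-- B replaces A's inner scan-and-test over all j in [i, n) with a direct step through the
-- multiples (range(i, n, i+1)); both mutate the input list identically (return value proved).


-- ===== PORT A =====
def how_many_switch (bulbs : List String) : Int :=
  ((PySem.List.pyRange 0 (bulbs.length : Int) 1).foldl
    (fun st i =>
      if PySem.List.pyGetD st.1 i "" == "Y" then
        ((PySem.List.pyRange i (st.1.length : Int) 1).foldl
            (fun bs j =>
              if PySem.Int.mod (j + 1) (i + 1) == 0 then
                PySem.List.pySetD bs j
                  (if PySem.List.pyGetD bs j "" == "Y" then "N" else "Y")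
              else bs)
            st.1,
         st.2 + 1)
      else st)
    (bulbs, (0 : Int))).2

-- ===== PORT B =====
-- helper _press: toggle every index j = i, i+(i+1), i+2(i+1), … directly
def pvPress (bulbs : List String) (i : Int) : List String :=
  (PySem.List.pyRange i (bulbs.length : Int) (i + 1)).foldl
    (fun bs j =>
      PySem.List.pySetD bs j
        (if PySem.List.pyGetD bs j "" == "Y" then "N" else "Y"))
    bulbs

def how_many_switch_alt (bulbs : List String) : Int :=
  ((PySem.List.pyRange 0 (bulbs.length : Int) 1).foldl
    (fun st i =>
      if PySem.List.pyGetD st.1 i "" == "Y" then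
        (pvPress st.1 i, st.2 + 1)
      else st)
    (bulbs, (0 : Int))).2

-- ===== PRECONDITION & SPEC =====
def Spec_how_many_switch (bulbs : List String) (out : Int) : Prop := out = how_many_switch_alt bulbs
instance (bulbs : List String) (out : Int) : Decidable (Spec_how_many_switch bulbs out) := by unfold Spec_how_many_switch; infer_instance

-- ===== CLAIM (what is proved, stated in full; the proofs are below) =====
def Claim_equal_how_many_switch : Prop := ∀ (bulbs : List String), Dom_how_many_switch bulbs → Spec_how_many_switch bulbs (how_many_switch bulbs)

-- ===== LEMMAS AND PROOFS =====

-- The indices j ∈ [a, n) with (j+1) % m == 0 are exactly range(a, n, m), provided (a+1) % m = 0.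
theorem pvPairwiseStep (a n m : Int) (hm : 0 < m) :
    (PySem.List.pyRange a n m).Pairwise (· < ·) := by
  rw [PySem.List.pyRange_of_pos a n hm]
  refine List.Pairwise.map _ (fun k k' hk => ?_) List.pairwise_lt_range
  have h : (k : Int) < k' := Int.ofNat_lt.mpr hk
  nlinarith

theorem pvFilterRange (a n m : Int) (hm : 0 < m) (ha : (a + 1) % m = 0) :
    (PySem.List.pyRange a n 1).filter (fun j => PySem.Int.mod (j + 1) m == 0)
      = PySem.List.pyRange a n m := by
  refine List.Perm.eq_of_pairwise (le := (· < · : Int → Int → Prop))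
    (fun a b _ _ h1 h2 => absurd h2 (not_lt.2 h1.le))
    ((PySem.List.pairwise_lt_pyRange_one a n).filter _)
    (pvPairwiseStep a n m hm) ?_
  rw [List.perm_ext_iff_of_nodup
    (((PySem.List.pairwise_lt_pyRange_one a n).filter _).imp fun h => ne_of_lt h)
    ((pvPairwiseStep a n m hm).imp fun h => ne_of_lt h)]
  intro x
  simp only [List.mem_filter, PySem.List.mem_pyRange_one,
    PySem.List.mem_pyRange_iff_of_pos hm, PySem.Int.mod_eq_emod_of_pos hm,
    beq_iff_eq]
  constructor
  · rintro ⟨⟨h1, h2⟩, h3⟩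
    refine ⟨h1, h2, ?_⟩
    have hx : m ∣ x + 1 := Int.dvd_of_emod_eq_zero h3
    have ha' : m ∣ a + 1 := Int.dvd_of_emod_eq_zero ha
    have hd : m ∣ (x + 1) - (a + 1) := dvd_sub hx ha'
    simpa using hd
  · rintro ⟨h1, h2, h3⟩
    refine ⟨⟨h1, h2⟩, ?_⟩
    have ha' : m ∣ a + 1 := Int.dvd_of_emod_eq_zero ha
    have hd : m ∣ (x - a) + (a + 1) := dvd_add h3 ha'
    have hx : m ∣ x + 1 := by
      have e : (x - a) + (a + 1) = x + 1 := by ring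
      rwa [e] at hd
    exact Int.emod_eq_zero_of_dvd hx

-- ===== VERDICT (by name: the statement is the Claim_ definition above) =====
theorem how_many_switch_spec : Claim_equal_how_many_switch := by
  intro bulbs _
  unfold Spec_how_many_switch how_many_switch how_many_switch_alt
  apply congrArg Prod.snd
  apply PySem.List.foldl_congr_mem
  intro acc i hi
  have hi0 : 0 ≤ i := ((PySem.List.mem_pyRange_one).1 hi).1
  by_cases h : PySem.List.pyGetD acc.1 i "" == "Y"
  · simp only [h, if_pos]
    refine congrArg (fun l => (l, acc.2 + 1)) ?_
    rw [PySem.List.foldl_if_eq_foldl_filter, pvFilterRange i _ (i + 1) (by omega)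
      (by simp), pvPress]
  · simp [h]
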